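-- pv_equiv track=rewrite | github.com/midsougou/DAD_library | KernelBased/kernel_library.py | spectrum_kernel
-- ===== SOURCE A (Python) =====
-- def spectrum_kernel(seq1, seq2, k=3):
--     # Extract k-mers from seq1
--     kmers1 = {}
--     for i in range(len(seq1) - k + 1):
--         kmer = seq1[i:i+k]
--         kmers1[kmer] = kmers1.get(kmer, 0) + 1
--
--     # Extract k-mers from seq2 and compute dot product
--     val = 0
--     for j in range(len(seq2) - k + 1):
--         kmer = seq2[j:j+k]
--         if kmer in kmers1:
--             val += kmers1[kmer]
--     return val
-- ===== SOURCE B (Python) =====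
-- def spectrum_kernel(seq1, seq2, k=3):
--     def counts(seq):
--         c = {}
--         for i in range(len(seq) - k + 1):
--             kmer = seq[i:i+k]
--             c[kmer] = c.get(kmer, 0) + 1
--         return c
--
--     c1 = counts(seq1)
--     c2 = counts(seq2)
--     return sum(c1.get(kmer, 0) * n2 for kmer, n2 in c2.items())
-- ===== Notes on version B (the rewrite author's own statement) =====
-- stated objective: alternative
-- what changed: B builds a second k-mer count table for seq2 and computes the kernel as a sum of count products over the distinct k-mers of seq2, instead of A's per-position scan of seq2 with a lookup at every position.
import Mathlib
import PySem

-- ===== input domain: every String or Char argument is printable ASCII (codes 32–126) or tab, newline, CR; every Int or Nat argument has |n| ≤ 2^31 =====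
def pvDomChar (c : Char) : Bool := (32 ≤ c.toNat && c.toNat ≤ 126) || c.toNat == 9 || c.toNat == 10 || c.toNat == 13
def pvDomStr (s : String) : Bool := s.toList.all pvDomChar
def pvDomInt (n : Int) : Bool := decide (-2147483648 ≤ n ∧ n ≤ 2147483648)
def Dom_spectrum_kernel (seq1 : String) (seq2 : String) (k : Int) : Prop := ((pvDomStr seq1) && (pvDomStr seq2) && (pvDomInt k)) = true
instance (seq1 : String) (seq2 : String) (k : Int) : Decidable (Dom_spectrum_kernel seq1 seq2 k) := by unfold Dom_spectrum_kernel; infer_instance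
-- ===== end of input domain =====

-- B computes the same spectrum kernel via a second k-mer count table and a per-distinct-k-mer
-- product sum instead of A's per-position scan of seq2 (alternative decomposition, same cost).


-- ===== PORT A =====
def spectrum_kernel (seq1 : String) (seq2 : String) (k : Int) : Int :=
  -- first loop: build the k-mer count dict of seq1
  let kmers1 : PySem.Dict String Int :=
    (PySem.List.pyRange 0 (PySem.Str.len seq1 - k + 1) 1).foldl
      (fun d i =>
        let kmer := PySem.Str.slice seq1 (some i) (some (i + k))
        d.insert kmer (d.getD kmer 0 + 1))
      PySem.Dict.empty
  -- second loop: scan every position of seq2, adding kmers1[kmer] when present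
  (PySem.List.pyRange 0 (PySem.Str.len seq2 - k + 1) 1).foldl
    (fun val j =>
      let kmer := PySem.Str.slice seq2 (some j) (some (j + k))
      if kmers1.contains kmer then val + kmers1.getD kmer 0 else val)
    0

-- ===== PORT B =====
-- B's helper counts(seq): the k-mer count dict of one sequence
def skCounts (seq : String) (k : Int) : PySem.Dict String Int :=
  (PySem.List.pyRange 0 (PySem.Str.len seq - k + 1) 1).foldl
    (fun c i =>
      let kmer := PySem.Str.slice seq (some i) (some (i + k))
      c.insert kmer (c.getD kmer 0 + 1))
    PySem.Dict.empty

def spectrum_kernel_alt (seq1 : String) (seq2 : String) (k : Int) : Int :=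
  let c1 := skCounts seq1 k
  let c2 := skCounts seq2 k
  (c2.items.map (fun p => c1.getD p.1 0 * p.2)).sum

-- ===== PRECONDITION & SPEC =====
def Spec_spectrum_kernel (seq1 : String) (seq2 : String) (k : Int) (out : Int) : Prop := out = spectrum_kernel_alt seq1 seq2 k
instance (seq1 : String) (seq2 : String) (k : Int) (out : Int) : Decidable (Spec_spectrum_kernel seq1 seq2 k out) := by unfold Spec_spectrum_kernel; infer_instance

-- ===== CLAIM (what is proved, stated in full; the proofs are below) =====
def Claim_equal_spectrum_kernel : Prop := ∀ (seq1 : String) (seq2 : String) (k : Int), Dom_spectrum_kernel seq1 seq2 k → Spec_spectrum_kernel seq1 seq2 k (spectrum_kernel seq1 seq2 k)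

-- ===== LEMMAS AND PROOFS =====

-- the list of k-mers of a sequence, in position order
def skKmers (seq : String) (k : Int) : List String :=
  (PySem.List.pyRange 0 (PySem.Str.len seq - k + 1) 1).map
    (fun i => PySem.Str.slice seq (some i) (some (i + k)))

-- both programs' counting loop builds Counter(k-mers)
lemma countLoop_eq_counter (seq : String) (k : Int) :
    (PySem.List.pyRange 0 (PySem.Str.len seq - k + 1) 1).foldl
      (fun d i => d.insert (PySem.Str.slice seq (some i) (some (i + k)))
          (d.getD (PySem.Str.slice seq (some i) (some (i + k))) 0 + 1)) PySem.Dict.empty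
    = PySem.Dict.counter (skKmers seq k) := by
  rw [skKmers, ← PySem.Dict.foldl_insert_getD_add_one_eq_counter, List.foldl_map]

-- A's scan of seq2 is a fold over the k-mer list of seq2
lemma scanLoop_eq_foldl_kmers (seq2 : String) (k : Int) (d : PySem.Dict String Int) :
    (PySem.List.pyRange 0 (PySem.Str.len seq2 - k + 1) 1).foldl
      (fun val j => if d.contains (PySem.Str.slice seq2 (some j) (some (j + k))) then
          val + d.getD (PySem.Str.slice seq2 (some j) (some (j + k))) 0 else val) 0
    = (skKmers seq2 k).foldl
      (fun val x => if d.contains x then val + d.getD x 0 else val) 0 := by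
  rw [skKmers, List.foldl_map]

lemma sum_ite_not_mem {α : Type} [DecidableEq α] (f : α → Int) (a : α) (s : List α)
    (ha : a ∉ s) : (s.map (fun x => if x = a then f x else 0)).sum = 0 := by
  induction s with
  | nil => simp
  | cons b s ih =>
    simp only [List.mem_cons, not_or] at ha
    simp [List.map_cons, List.sum_cons, Ne.symm ha.1, ih ha.2]

lemma sum_ite_nodup {α : Type} [DecidableEq α] (f : α → Int) (a : α) (s : List α)
    (hs : s.Nodup) (ha : a ∈ s) :
    (s.map (fun x => if x = a then f x else 0)).sum = f a := by
  induction s with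
  | nil => cases ha
  | cons b s ih =>
    rcases List.nodup_cons.mp hs with ⟨hb, hs'⟩
    rcases List.mem_cons.mp ha with h | h
    · subst h
      simp [sum_ite_not_mem f a s hb]
    · have hba : b ≠ a := fun e => hb (e ▸ h)
      simp [hba, ih hs' h]

-- regrouping: a sum over all elements of l equals the count-weighted sum over any
-- duplicate-free superset s of l's elements
lemma sum_count_mul {α : Type} [DecidableEq α] (f : α → Int) (l s : List α)
    (hs : s.Nodup) (hsub : ∀ x ∈ l, x ∈ s) :
    (s.map (fun x => (l.count x : Int) * f x)).sum = (l.map f).sum := by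
  induction l with
  | nil => simp
  | cons a l ih =>
    have hstep : (s.map (fun x => ((a :: l).count x : Int) * f x)) =
        (s.map (fun x => (l.count x : Int) * f x + if x = a then f x else 0)) := by
      apply List.map_congr_left
      intro x _
      by_cases h : x = a
      · subst h; simp [List.count_cons_self]; ring
      · simp [h, Ne.symm h]
    rw [hstep, PySem.List.sum_map_add_int, ih (fun x hx => hsub x (List.mem_cons_of_mem a hx)),
        sum_ite_nodup f a s hs (hsub a List.mem_cons_self)]
    simp [add_comm]

-- A's second loop over positions of seq2 sums the seq1-counts of seq2's k-mers
lemma loopA_eq_sum (L1 L2 : List String) :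
    L2.foldl (fun val x =>
      if (PySem.Dict.counter L1).contains x then val + (PySem.Dict.counter L1).getD x 0 else val) 0
    = (L2.map (fun x => (L1.count x : Int))).sum := by
  have h : L2.foldl (fun val x =>
      if (PySem.Dict.counter L1).contains x then val + (PySem.Dict.counter L1).getD x 0 else val) 0
      = L2.foldl (fun val x => val + (L1.count x : Int)) 0 := by
    apply PySem.List.foldl_congr_mem
    intro v x _
    by_cases h : x ∈ L1
    · simp [PySem.Dict.contains_counter, h, PySem.Dict.getD_counter]
    · simp [PySem.Dict.contains_counter, h, List.count_eq_zero_of_not_mem h]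
  rw [h, PySem.List.foldl_add]
  simp

-- ===== VERDICT (by name: the statement is the Claim_ definition above) =====
theorem spectrum_kernel_spec : Claim_equal_spectrum_kernel := by
  intro seq1 seq2 k _
  unfold Spec_spectrum_kernel spectrum_kernel spectrum_kernel_alt skCounts
  dsimp only
  rw [countLoop_eq_counter, countLoop_eq_counter,
      scanLoop_eq_foldl_kmers, loopA_eq_sum, PySem.Dict.items_counter, List.map_map]
  rw [← sum_count_mul (fun x => ((skKmers seq1 k).count x : Int)) (skKmers seq2 k)
      (PySem.Set.ofList (skKmers seq2 k)) (PySem.Set.nodup_ofList _)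
      (fun x hx => (PySem.Set.mem_ofList _ _).mpr hx)]
  apply congrArg
  apply List.map_congr_left
  intro x _
  simp [PySem.Dict.getD_counter, Function.comp]
  ring
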